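-- pv_equiv track=rewrite | github.com/KBS-Labs/dataknobs | packages/xization/src/dataknobs_xization/markdown/enrichment.py | build_enriched_text
-- ===== SOURCE A (Python) =====
-- def build_enriched_text(heading_path: list[str], content: str) -> str:
--     """Build text for embedding with relevant heading context.
--
--     Uses a modified approach where headings are included up from the chunk
--     until and including the first multi-word heading. This provides semantic
--     context without over-weighting deep, single-word labels like "Example".
--
--     Args:
--         heading_path: List of heading texts from root to chunk
--         content: The chunk content text
--
--     Returns:
--         Enriched text suitable for embedding
--
--     Examples:
--         >>> build_enriched_text(["Patterns", "Chain-of-Thought", "Example"], "code here")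
--         'Chain-of-Thought: Example: code here'
--
--         >>> build_enriched_text(["Setup"], "install steps")
--         'Setup: install steps'
--
--         >>> build_enriched_text(["API Reference", "Authentication", "OAuth 2.0"], "...")
--         'Authentication: OAuth 2.0: ...'
--
--         >>> build_enriched_text([], "standalone content")
--         'standalone content'
--     """
--     if not heading_path:
--         return content
--
--     # Walk backwards from deepest heading to find relevant context
--     relevant_headings = []
--     for heading in reversed(heading_path):
--         relevant_headings.insert(0, heading)
--         # Stop after including a multi-word heading
--         if len(heading.split()) > 1:
--             break
--
--     # Build the enriched text
--     if relevant_headings: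
--         prefix = ": ".join(relevant_headings)
--         return f"{prefix}: {content}"
--
--     return content
-- ===== SOURCE B (Python) =====
-- def build_enriched_text(heading_path: list[str], content: str) -> str:
--     """Build text for embedding with relevant heading context (forward-scan version)."""
--     if not heading_path:
--         return content
--
--     # One forward pass: remember the index of the LAST multi-word heading (0 if none).
--     start = 0
--     for i, heading in enumerate(heading_path):
--         if len(heading.split()) > 1:
--             start = i
--
--     prefix = ": ".join(heading_path[start:])
--     return f"{prefix}: {content}"
-- ===== Notes on version B (the rewrite author's own statement) =====
-- stated objective: simpler
-- what changed: Replaces A's backward walk with insert(0,...) accumulation and an early break by a single forward pass that records the index of the last multi-word heading and slices the path once; the always-true 'if relevant_headings' guard disappears.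
import Mathlib
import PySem

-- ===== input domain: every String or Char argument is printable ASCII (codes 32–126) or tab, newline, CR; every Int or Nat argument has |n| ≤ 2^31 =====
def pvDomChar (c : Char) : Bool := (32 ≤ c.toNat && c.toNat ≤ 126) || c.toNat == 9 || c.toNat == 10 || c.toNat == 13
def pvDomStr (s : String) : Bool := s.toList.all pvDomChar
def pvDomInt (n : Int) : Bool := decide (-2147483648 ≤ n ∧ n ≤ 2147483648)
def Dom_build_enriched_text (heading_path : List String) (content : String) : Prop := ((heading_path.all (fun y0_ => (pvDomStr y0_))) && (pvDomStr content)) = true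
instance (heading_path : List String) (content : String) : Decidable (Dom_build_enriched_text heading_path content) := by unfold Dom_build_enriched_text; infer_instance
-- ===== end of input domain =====

-- B replaces A's backward break-loop (insert-at-front accumulation) by one forward pass
-- recording the index of the last multi-word heading, then a single slice — simpler decomposition.


-- ===== PORT A =====
-- len(heading.split()) > 1  (str.split with no argument)
def betMultiWord (h : String) : Bool := (PySem.Str.split₀ h).length > 1

-- A's loop: for heading in reversed(heading_path): insert(0, heading); break after a multi-word one.
-- relevant_headings.insert(0, heading) is exactly a cons on the accumulator.
def betGo : List String → List String → List String
  | [], acc => acc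
  | h :: rest, acc =>
      let acc' := h :: acc
      if betMultiWord h then acc' else betGo rest acc'

def build_enriched_text (heading_path : List String) (content : String) : String :=
  if heading_path = [] then content
  else
    let relevant := betGo heading_path.reverse []
    if relevant ≠ [] then
      let prefixS := PySem.Str.join ": " relevant
      prefixS ++ ": " ++ content
    else content

-- ===== PORT B =====
-- B's forward pass: start = index of the last heading with len(h.split()) > 1, default 0.
def betStart (heading_path : List String) : Int :=
  (PySem.List.enumerate heading_path 0).foldl
    (fun st p => if betMultiWord p.2 then p.1 else st) 0

def build_enriched_text_alt (heading_path : List String) (content : String) : String :=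
  if heading_path = [] then content
  else
    let start := betStart heading_path
    let prefixS := PySem.Str.join ": " (PySem.List.slice heading_path (some start) none)
    prefixS ++ ": " ++ content

-- ===== PRECONDITION & SPEC =====
def Spec_build_enriched_text (heading_path : List String) (content : String) (out : String) : Prop := out = build_enriched_text_alt heading_path content
instance (heading_path : List String) (content : String) (out : String) : Decidable (Spec_build_enriched_text heading_path content out) := by unfold Spec_build_enriched_text; infer_instance

-- ===== CLAIM (what is proved, stated in full; the proofs are below) =====
def Claim_equal_build_enriched_text : Prop := ∀ (heading_path : List String) (content : String), Dom_build_enriched_text heading_path content → Spec_build_enriched_text heading_path content (build_enriched_text heading_path content)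

-- ===== LEMMAS AND PROOFS =====

theorem betGo_acc (l : List String) (acc : List String) :
    betGo l acc = betGo l [] ++ acc := by
  induction l generalizing acc with
  | nil => simp [betGo]
  | cons h rest ih =>
      simp only [betGo]
      by_cases hm : betMultiWord h
      · simp [hm]
      · simp only [hm, Bool.false_eq_true, if_false]
        rw [ih (h :: acc), ih [h], List.append_assoc]
        rfl

theorem betGo_eq_nil (l : List String) (acc : List String) :
    betGo l acc = [] → l = [] ∧ acc = [] := by
  induction l generalizing acc with
  | nil => simp [betGo]
  | cons h rest ih =>
      intro hEq
      simp only [betGo] at hEq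
      by_cases hm : betMultiWord h
      · simp [hm] at hEq
      · simp only [hm, Bool.false_eq_true, if_false] at hEq
        exact absurd (ih _ hEq).2 (by simp)

theorem enumerate_append_singleton (xs : List String) (x : String) (s : Int) :
    PySem.List.enumerate (xs ++ [x]) s = PySem.List.enumerate xs s ++ [(s + xs.length, x)] := by
  induction xs generalizing s with
  | nil => simp [PySem.List.enumerate_nil, PySem.List.enumerate_cons]
  | cons y ys ih =>
      have h : s + 1 + (ys.length : Int) = s + ((ys.length + 1 : Nat) : Int) := by
        push_cast; ring
      simp only [List.cons_append, PySem.List.enumerate_cons, ih (s + 1), List.length_cons, h]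

theorem betStart_append (hp : List String) (x : String) :
    betStart (hp ++ [x]) = if betMultiWord x then (hp.length : Int) else betStart hp := by
  unfold betStart
  rw [enumerate_append_singleton, List.foldl_append]
  simp

theorem betStart_bounds (hp : List String) :
    0 ≤ betStart hp ∧ betStart hp ≤ hp.length := by
  induction hp using List.reverseRecOn with
  | nil => simp [betStart, PySem.List.enumerate_nil]
  | append_singleton ys x ih =>
      rw [betStart_append]
      by_cases hm : betMultiWord x
      · rw [if_pos hm]
        refine ⟨Int.natCast_nonneg _, ?_⟩
        simp only [List.length_append, List.length_cons, List.length_nil]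
        push_cast
        omega
      · rw [if_neg hm]
        obtain ⟨h0, hle⟩ := ih
        refine ⟨h0, ?_⟩
        simp only [List.length_append, List.length_cons, List.length_nil]
        push_cast
        omega

theorem betGo_eq_drop (hp : List String) :
    betGo hp.reverse [] = PySem.List.slice hp (some (betStart hp)) none := by
  induction hp using List.reverseRecOn with
  | nil =>
      simp only [List.reverse_nil, betGo, betStart, PySem.List.enumerate_nil, List.foldl_nil]
      rw [PySem.List.slice_from _ (le_refl 0)]
      simp
  | append_singleton ys x ih =>
      rw [List.reverse_append, betStart_append]
      simp only [List.reverse_cons, List.nil_append, List.reverse_nil, List.singleton_append]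
      by_cases hm : betMultiWord x
      · rw [if_pos hm]
        simp only [betGo, hm, if_true]
        rw [PySem.List.slice_from_natCast, List.drop_left]
      · rw [if_neg hm]
        simp only [betGo, hm, Bool.false_eq_true, if_false]
        rw [betGo_acc, ih]
        obtain ⟨h0, hle⟩ := betStart_bounds ys
        rw [PySem.List.slice_from _ h0, PySem.List.slice_from _ h0,
          List.drop_append_of_le_length (l₁ := ys) (l₂ := [x]) (i := (betStart ys).toNat)
            (Int.toNat_le.mpr hle)]

theorem build_enriched_text_spec : Claim_equal_build_enriched_text := by
  intro heading_path content _
  unfold Spec_build_enriched_text build_enriched_text build_enriched_text_alt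
  by_cases hn : heading_path = []
  · simp [hn]
  · rw [if_neg hn, if_neg hn]
    have hne : betGo heading_path.reverse [] ≠ [] := by
      intro h
      exact hn (by simpa using (betGo_eq_nil _ _ h).1)
    rw [betGo_eq_drop] at hne
    simp only [betGo_eq_drop]
    rw [if_pos hne]
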